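-- pv_equiv track=rewrite | github.com/fsalmasri/sustain | visualization/visUtils.py | names_remapping
-- ===== SOURCE A (Python) =====
-- def names_remapping(uniques):
--     mapping = {}
--     for f in uniques:
--         if 'B' in f:
--             mapping[f] = 'B'
--         if 'H' in f:
--             mapping[f] = 'H'
--         if 'Q' in f:
--             mapping[f] = 'Q'
--         if 'Y' in f:
--             mapping[f] = 'Y'
--         if 'X' in f:
--             mapping[f] = 'X'
--         if 'P' in f:
--             mapping[f] = 'P'
--         if 'A' in f:
--             mapping[f] = 'A'
--         if 'D' in f:
--             mapping[f] = 'D'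
--         if 'S' in f:
--             mapping[f] = 'S'
--         if 'M' in f:
--             mapping[f] = 'M'
--         if 'R' in f:
--             mapping[f] = 'R'
--         if 'T' in f:
--             mapping[f] = 'T'
--
--     return mapping
-- ===== SOURCE B (Python) =====
-- def names_remapping(uniques):
--     letters = 'BHQYXPADSMRT'
--     prio = {c: i for i, c in enumerate(letters)}
--     mapping = {}
--     for f in uniques:
--         best = -1
--         for ch in f:
--             i = prio.get(ch, -1)
--             if best < i:
--                 best = i
--         if 0 <= best:
--             mapping[f] = letters[best]
--     return mapping
-- ===== Notes on version B (the rewrite author's own statement) =====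
-- stated objective: alternative
-- what changed: Replaced A's 12 sequential substring-membership branches with dict-overwrite ('last listed letter wins') by a single per-string character scan that tracks the maximal priority index via a precomputed priority-index dict and inserts the winning letter once.
import Mathlib
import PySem

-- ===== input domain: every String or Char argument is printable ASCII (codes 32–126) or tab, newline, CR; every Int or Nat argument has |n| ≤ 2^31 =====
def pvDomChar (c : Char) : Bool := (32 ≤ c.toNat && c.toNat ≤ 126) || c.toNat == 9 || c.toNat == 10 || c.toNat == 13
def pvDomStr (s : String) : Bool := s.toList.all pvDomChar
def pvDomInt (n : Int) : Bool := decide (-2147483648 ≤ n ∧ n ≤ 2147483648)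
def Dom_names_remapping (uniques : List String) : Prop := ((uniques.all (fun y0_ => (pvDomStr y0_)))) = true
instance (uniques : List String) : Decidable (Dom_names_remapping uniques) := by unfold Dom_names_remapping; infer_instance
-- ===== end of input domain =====

-- B replaces A's 12 sequential substring-membership branches (last match overwrites)
-- by one per-string character pass that tracks the maximal priority index via a
-- priority-index dict, inserting the corresponding letter once; objective: alternative.


-- ===== PORT A =====
def names_remapping (uniques : List String) : List (String × String) :=
  (uniques.foldl (fun mapping f =>
      let mapping := if PySem.Str.isIn "B" f then mapping.insert f "B" else mapping
      let mapping := if PySem.Str.isIn "H" f then mapping.insert f "H" else mapping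
      let mapping := if PySem.Str.isIn "Q" f then mapping.insert f "Q" else mapping
      let mapping := if PySem.Str.isIn "Y" f then mapping.insert f "Y" else mapping
      let mapping := if PySem.Str.isIn "X" f then mapping.insert f "X" else mapping
      let mapping := if PySem.Str.isIn "P" f then mapping.insert f "P" else mapping
      let mapping := if PySem.Str.isIn "A" f then mapping.insert f "A" else mapping
      let mapping := if PySem.Str.isIn "D" f then mapping.insert f "D" else mapping
      let mapping := if PySem.Str.isIn "S" f then mapping.insert f "S" else mapping
      let mapping := if PySem.Str.isIn "M" f then mapping.insert f "M" else mapping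
      let mapping := if PySem.Str.isIn "R" f then mapping.insert f "R" else mapping
      let mapping := if PySem.Str.isIn "T" f then mapping.insert f "T" else mapping
      mapping)
    PySem.Dict.empty).items

-- ===== PORT B =====
def lettersB : String := "BHQYXPADSMRT"

-- prio = {c: i for i, c in enumerate(letters)} written out as the literal association list
def prioB : PySem.Dict Char Int :=
  PySem.Dict.ofList [('B',0),('H',1),('Q',2),('Y',3),('X',4),('P',5),
                     ('A',6),('D',7),('S',8),('M',9),('R',10),('T',11)]

def names_remapping_alt (uniques : List String) : List (String × String) :=
  (uniques.foldl (fun mapping f =>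
      let best := f.toList.foldl
        (fun best ch => let i := prioB.getD ch (-1); if best < i then i else best) (-1)
      if 0 ≤ best then
        -- letters[best]: 0 ≤ best < 12 always holds here, so pyGet? returns a char
        match PySem.Str.pyGet? lettersB best with
        | some c => mapping.insert f (String.ofList [c])
        | none => mapping
      else mapping)
    PySem.Dict.empty).items

-- ===== PRECONDITION & SPEC =====
def Spec_names_remapping (uniques : List String) (out : List (String × String)) : Prop := out = names_remapping_alt uniques
instance (uniques : List String) (out : List (String × String)) : Decidable (Spec_names_remapping uniques out) := by unfold Spec_names_remapping; infer_instance

-- ===== CLAIM (what is proved, stated in full; the proofs are below) =====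
def Claim_equal_names_remapping : Prop := ∀ (uniques : List String), Dom_names_remapping uniques → Spec_names_remapping uniques (names_remapping uniques)

-- ===== LEMMAS AND PROOFS =====

-- the priority letters, lowest priority first (= lettersB.toList)
def lettersL : List Char := ['B','H','Q','Y','X','P','A','D','S','M','R','T']

-- 'c in f' for a single character is list membership
theorem isIn_single (c : Char) (s : String) :
    PySem.Str.isIn (String.ofList [c]) s = decide (c ∈ s.toList) := by
  rcases h : decide (c ∈ s.toList) with _|_ <;> simp at h
  · simp [PySem.Str.isIn, PySem.Chars.isIn_eq_false_iff, List.singleton_infix_iff, h]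
  · simp [PySem.Str.isIn, PySem.Chars.isIn_iff_infix, List.singleton_infix_iff, h]

-- A's overwrite chain over any letter list = insert of the LAST letter present
theorem foldl_insert_eq_find (f : String) : ∀ (ks : List Char) (m : PySem.Dict String String),
    ks.foldl (fun m c => if c ∈ f.toList then m.insert f (String.ofList [c]) else m) m
      = match ks.reverse.find? (fun c => decide (c ∈ f.toList)) with
        | none => m
        | some c => m.insert f (String.ofList [c]) := by
  intro ks
  induction ks using List.reverseRecOn with
  | nil => intro m; rfl
  | append_singleton ks c ih =>
    intro m
    rw [List.foldl_append, List.foldl_cons, List.foldl_nil, List.reverse_append,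
        List.reverse_singleton, List.singleton_append, List.find?_cons]
    by_cases hc : c ∈ f.toList
    · simp only [hc, if_pos, decide_true]
      rw [ih]
      rcases h : List.find? (fun c => decide (c ∈ f.toList)) ks.reverse with _ | c'
      · simp
      · simp [PySem.Dict.insert_insert_self]
    · simp only [hc, if_neg, not_false_iff, decide_false]
      rw [ih]

-- the priority index of an arbitrary character
theorem idx_cases (c : Char) :
    (prioB.getD c (-1) = -1 ∧ c ∉ lettersL) ∨
    (∃ k : Nat, k < 12 ∧ prioB.getD c (-1) = (k : Int) ∧ lettersL[k]! = c) := by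
  rcases eq_or_ne 'B' c with h|hB; · subst h; exact Or.inr ⟨0, by omega, by decide, by decide⟩
  rcases eq_or_ne 'H' c with h|hH; · subst h; exact Or.inr ⟨1, by omega, by decide, by decide⟩
  rcases eq_or_ne 'Q' c with h|hQ; · subst h; exact Or.inr ⟨2, by omega, by decide, by decide⟩
  rcases eq_or_ne 'Y' c with h|hY; · subst h; exact Or.inr ⟨3, by omega, by decide, by decide⟩
  rcases eq_or_ne 'X' c with h|hX; · subst h; exact Or.inr ⟨4, by omega, by decide, by decide⟩
  rcases eq_or_ne 'P' c with h|hP; · subst h; exact Or.inr ⟨5, by omega, by decide, by decide⟩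
  rcases eq_or_ne 'A' c with h|hA; · subst h; exact Or.inr ⟨6, by omega, by decide, by decide⟩
  rcases eq_or_ne 'D' c with h|hD; · subst h; exact Or.inr ⟨7, by omega, by decide, by decide⟩
  rcases eq_or_ne 'S' c with h|hS; · subst h; exact Or.inr ⟨8, by omega, by decide, by decide⟩
  rcases eq_or_ne 'M' c with h|hM; · subst h; exact Or.inr ⟨9, by omega, by decide, by decide⟩
  rcases eq_or_ne 'R' c with h|hR; · subst h; exact Or.inr ⟨10, by omega, by decide, by decide⟩
  rcases eq_or_ne 'T' c with h|hT; · subst h; exact Or.inr ⟨11, by omega, by decide, by decide⟩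
  left
  constructor
  · show (PySem.Dict.mk [('B',0),('H',1),('Q',2),('Y',3),('X',4),('P',5),
        ('A',6),('D',7),('S',8),('M',9),('R',10),('T',11)]).getD c (-1) = -1
    simp [PySem.Dict.getD_eq_get?_getD, PySem.Dict.get?,
          hB, hH, hQ, hY, hX, hP, hA, hD, hS, hM, hR, hT]
  · simp only [lettersL, List.mem_cons, List.not_mem_nil, or_false]
    tauto

-- index of each letter
theorem idx_letter (k : Nat) (hk : k < 12) : prioB.getD (lettersL[k]!) (-1) = (k : Int) := by
  interval_cases k <;> decide

-- the inner character fold: lower bound, upper bound for every char, and attainment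
theorem best_spec : ∀ (l : List Char) (b : Int),
    b ≤ l.foldl (fun best ch => let i := prioB.getD ch (-1); if best < i then i else best) b ∧
    (∀ c ∈ l, prioB.getD c (-1) ≤ l.foldl (fun best ch => let i := prioB.getD ch (-1); if best < i then i else best) b) ∧
    (l.foldl (fun best ch => let i := prioB.getD ch (-1); if best < i then i else best) b = b ∨
      ∃ c ∈ l, l.foldl (fun best ch => let i := prioB.getD ch (-1); if best < i then i else best) b = prioB.getD c (-1)) := by
  intro l
  induction l with
  | nil => intro b; exact ⟨le_refl _, by simp, Or.inl rfl⟩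
  | cons c0 cs ih =>
    intro b
    simp only [List.foldl_cons]
    obtain ⟨h1, h2, h3⟩ := ih (if b < prioB.getD c0 (-1) then prioB.getD c0 (-1) else b)
    refine ⟨?_, ?_, ?_⟩
    · exact le_trans (by split_ifs with h <;> omega) h1
    · intro c hc
      rcases List.mem_cons.mp hc with h | h
      · subst h; exact le_trans (by split_ifs with h <;> omega) h1
      · exact h2 c h
    · rcases h3 with h | ⟨c, hc, h⟩
      · rw [h]
        split_ifs with hb
        · exact Or.inr ⟨c0, List.mem_cons_self, rfl⟩
        · exact Or.inl rfl
      · exact Or.inr ⟨c, List.mem_cons_of_mem _ hc, h⟩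

-- per-string: A's 12-branch body equals B's scan body
theorem step_eq (f : String) (m : PySem.Dict String String) :
    (let m1 := if PySem.Str.isIn "B" f then m.insert f "B" else m
     let m2 := if PySem.Str.isIn "H" f then m1.insert f "H" else m1
     let m3 := if PySem.Str.isIn "Q" f then m2.insert f "Q" else m2
     let m4 := if PySem.Str.isIn "Y" f then m3.insert f "Y" else m3
     let m5 := if PySem.Str.isIn "X" f then m4.insert f "X" else m4
     let m6 := if PySem.Str.isIn "P" f then m5.insert f "P" else m5
     let m7 := if PySem.Str.isIn "A" f then m6.insert f "A" else m6
     let m8 := if PySem.Str.isIn "D" f then m7.insert f "D" else m7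
     let m9 := if PySem.Str.isIn "S" f then m8.insert f "S" else m8
     let m10 := if PySem.Str.isIn "M" f then m9.insert f "M" else m9
     let m11 := if PySem.Str.isIn "R" f then m10.insert f "R" else m10
     let m12 := if PySem.Str.isIn "T" f then m11.insert f "T" else m11
     m12)
    = (let best := f.toList.foldl
         (fun best ch => let i := prioB.getD ch (-1); if best < i then i else best) (-1)
       if 0 ≤ best then
         match PySem.Str.pyGet? lettersB best with
         | some c => m.insert f (String.ofList [c])
         | none => m
       else m) := by
  have hchain :
      (let m1 := if PySem.Str.isIn "B" f then m.insert f "B" else m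
       let m2 := if PySem.Str.isIn "H" f then m1.insert f "H" else m1
       let m3 := if PySem.Str.isIn "Q" f then m2.insert f "Q" else m2
       let m4 := if PySem.Str.isIn "Y" f then m3.insert f "Y" else m3
       let m5 := if PySem.Str.isIn "X" f then m4.insert f "X" else m4
       let m6 := if PySem.Str.isIn "P" f then m5.insert f "P" else m5
       let m7 := if PySem.Str.isIn "A" f then m6.insert f "A" else m6
       let m8 := if PySem.Str.isIn "D" f then m7.insert f "D" else m7
       let m9 := if PySem.Str.isIn "S" f then m8.insert f "S" else m8
       let m10 := if PySem.Str.isIn "M" f then m9.insert f "M" else m9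
       let m11 := if PySem.Str.isIn "R" f then m10.insert f "R" else m10
       let m12 := if PySem.Str.isIn "T" f then m11.insert f "T" else m11
       m12)
      = lettersL.foldl (fun m c => if c ∈ f.toList then m.insert f (String.ofList [c]) else m) m := by
    simp only [lettersL, List.foldl_cons, List.foldl_nil]
    repeat rw [isIn_single]
    simp only [decide_eq_true_eq]
  rw [hchain, foldl_insert_eq_find f lettersL m]
  obtain ⟨hlb, hub, hatt⟩ := best_spec f.toList (-1)
  set best := f.toList.foldl
    (fun best ch => let i := prioB.getD ch (-1); if best < i then i else best) (-1) with hbest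
  by_cases h0 : 0 ≤ best
  · -- some letter occurs in f: best = idx c0 for a witness c0
    rcases hatt with h | ⟨c0, hc0, hc0v⟩
    · omega
    rcases idx_cases c0 with ⟨hneg, _⟩ | ⟨k, hk, hkv, hkc⟩
    · omega
    -- B side: letters[best] = c0
    have hlist : lettersB.toList = lettersL := rfl
    have hget : PySem.Str.pyGet? lettersB best = some c0 := by
      rw [hc0v, hkv]
      have : PySem.Str.pyGet? lettersB ((k : Nat) : Int) = lettersB.toList[k]? := by
        simp [PySem.Str.pyGet?_eq]
      have hklen : k < lettersL.length := by simpa [lettersL] using hk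
      have hkc' : lettersL[k] = c0 := by
        rw [← hkc]
        simp [List.getElem!_eq_getElem?_getD, List.getElem?_eq_getElem hklen]
      rw [this, hlist, List.getElem?_eq_getElem hklen, hkc']
    -- A side: the last letter present in lettersL is c0
    have hsplit : lettersL = lettersL.take k ++ lettersL[k]! :: lettersL.drop (k + 1) := by
      conv_lhs => rw [← List.take_append_drop k lettersL]
      congr 1
      rw [List.drop_eq_getElem_cons (by simpa [lettersL] using hk)]
      congr 1
      simp [List.getElem!_eq_getElem?_getD, List.getElem?_eq_getElem (show k < lettersL.length by simpa [lettersL] using hk)]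
    have hnone : List.find? (fun c => decide (c ∈ f.toList)) (lettersL.drop (k + 1)).reverse = none := by
      rw [List.find?_eq_none]
      intro x hx
      simp only [List.mem_reverse] at hx
      obtain ⟨i, hi, hix⟩ := List.mem_iff_getElem.mp hx
      rw [List.getElem_drop] at hix
      have hlen : (lettersL.drop (k + 1)).length = 12 - (k + 1) := by simp [lettersL]
      have hidx : prioB.getD x (-1) = ((k + 1 + i : Nat) : Int) := by
        rw [← hix]
        have h12 : k + 1 + i < 12 := by omega
        have := idx_letter (k + 1 + i) h12
        rwa [List.getElem!_eq_getElem?_getD,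
             List.getElem?_eq_getElem (show k + 1 + i < lettersL.length by simpa [lettersL] using h12)] at this
      simp only [decide_eq_true_eq]
      intro hxf
      have h1 := hub x hxf
      have h2 : best = (k : Int) := hc0v.trans hkv
      rw [hidx, h2] at h1
      omega
    have hfind : List.find? (fun c => decide (c ∈ f.toList)) lettersL.reverse = some c0 := by
      rw [hsplit, List.reverse_append, List.reverse_cons, List.find?_append, List.find?_append,
          hnone, hkc]
      simp [hc0]
    rw [hfind, if_pos h0, hget]
  · -- no letter occurs in f
    have hm1 : best = -1 := by omega
    have hnone : List.find? (fun c => decide (c ∈ f.toList)) lettersL.reverse = none := by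
      rw [List.find?_eq_none]
      intro x hx
      simp only [List.mem_reverse] at hx
      simp only [decide_eq_true_eq]
      intro hxf
      have hle := hub x hxf
      rw [hm1] at hle
      rcases idx_cases x with ⟨_, hnx⟩ | ⟨k, _, hkv, _⟩
      · exact hnx hx
      · rw [hkv] at hle; omega
    rw [hnone, if_neg h0]

-- ===== VERDICT (by name: the statement is the Claim_ definition above) =====
theorem names_remapping_spec : Claim_equal_names_remapping := by
  intro uniques _
  unfold Spec_names_remapping names_remapping names_remapping_alt
  congr 1
  apply PySem.List.foldl_congr_mem
  intro m f _
  exact step_eq f m
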